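-- pv_equiv track=rewrite | github.com/l1akshya/writer2 | app/report/main.py | find_author_block_bounds
-- ===== SOURCE A (Python) =====
-- def find_author_block_bounds(latex_code: str) -> tuple:
--     """Find the start and end positions of the \\author{...} block"""
--     # Look for \author{ (with actual backslash)
--     search_str = "\\author{"
--     author_start = latex_code.find(search_str)
--
--     if author_start == -1:
--         return None, None
--
--     # Find matching closing brace
--     brace_count = 0
--     i = author_start + len(search_str) - 1  # Start at the opening brace
--
--     while i < len(latex_code):
--         if latex_code[i] == '{':
--             brace_count += 1
--         elif latex_code[i] == '}':
--             brace_count -= 1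
--             if brace_count == 0:
--                 return author_start, i + 1
--         i += 1
--
--     return None, None
-- ===== SOURCE B (Python) =====
-- def find_author_block_bounds(latex_code: str) -> tuple:
--     """Find the start and end positions of the \\author{...} block.
--
--     Instead of walking the text character by character, jump directly
--     between brace positions with str.find, keeping a depth counter.
--     """
--     author_start = latex_code.find("\\author{")
--     if author_start == -1:
--         return None, None
--     depth = 0
--     pos = author_start + len("\\author{") - 1  # index of the opening brace
--     while True:
--         nc = latex_code.find('}', pos)
--         if nc == -1:
--             return None, None
--         no = latex_code.find('{', pos)
--         if no != -1 and no < nc: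
--             depth += 1
--             pos = no + 1
--         else:
--             depth -= 1
--             if depth == 0:
--                 return author_start, nc + 1
--             pos = nc + 1
-- ===== Notes on version B (the rewrite author's own statement) =====
-- stated objective: alternative
-- what changed: B replaces A's per-character while loop over indices with a loop that jumps directly between the next opening-brace and closing-brace positions located with str.find, updating the depth counter only at braces.
import Mathlib
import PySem

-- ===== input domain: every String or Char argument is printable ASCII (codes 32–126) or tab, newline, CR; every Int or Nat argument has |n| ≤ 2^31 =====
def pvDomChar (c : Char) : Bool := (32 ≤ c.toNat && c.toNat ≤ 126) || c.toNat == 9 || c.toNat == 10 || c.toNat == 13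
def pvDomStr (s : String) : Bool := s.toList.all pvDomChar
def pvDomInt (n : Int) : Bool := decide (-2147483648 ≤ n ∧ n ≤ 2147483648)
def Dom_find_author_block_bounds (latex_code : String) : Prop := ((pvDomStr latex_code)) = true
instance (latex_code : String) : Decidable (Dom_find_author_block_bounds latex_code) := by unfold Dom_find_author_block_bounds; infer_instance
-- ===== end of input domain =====

-- B finds the \author{...} block by jumping between brace positions with str.find instead of walking every character; same result, different traversal.

-- ===== PORT A =====
-- A's while loop: index i walks every character from the opening brace, keeping brace_count.
def pvALoop (cs : List Char) (st : Int) (count : Int) (i : Int) : Option Int × Option Int :=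
  if _h : i < (cs.length : Int) then
    let c := PySem.List.pyGetD cs i ' '
    if c = '{' then pvALoop cs st (count + 1) (i + 1)
    else if c = '}' then
      (if count - 1 = 0 then (some st, some (i + 1)) else pvALoop cs st (count - 1) (i + 1))
    else pvALoop cs st count (i + 1)
  else (none, none)
termination_by ((cs.length : Int) - i).toNat
decreasing_by all_goals omega

def find_author_block_bounds (latex_code : String) : Option Int × Option Int :=
  let author_start := PySem.Str.find latex_code "\\author{"
  if author_start = -1 then (none, none)
  else pvALoop latex_code.toList author_start 0 (author_start + 8 - 1)

-- ===== PORT B =====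
-- B's loop: jump between the next opening/closing brace positions (str.find), adjusting depth only at braces.
-- fuel only makes the recursion obviously total; the top call supplies enough.
def pvBLoop : Nat → List Char → Int → Int → Nat → Option Int × Option Int
  | 0, _, _, _, _ => (none, none)
  | fuel + 1, cs, st, depth, pos =>
    let nc := PySem.Chars.findFrom cs ['}'] (pos : Int) none
    if nc = -1 then (none, none)
    else
      let no := PySem.Chars.findFrom cs ['{'] (pos : Int) none
      if no ≠ -1 ∧ no < nc then pvBLoop fuel cs st (depth + 1) (no + 1).toNat
      else if depth - 1 = 0 then (some st, some (nc + 1))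
      else pvBLoop fuel cs st (depth - 1) (nc + 1).toNat

def find_author_block_bounds_alt (latex_code : String) : Option Int × Option Int :=
  let author_start := PySem.Str.find latex_code "\\author{"
  if author_start = -1 then (none, none)
  else pvBLoop (latex_code.toList.length + 1) latex_code.toList author_start 0
        (author_start + 8 - 1).toNat

-- ===== PRECONDITION & SPEC =====
def Spec_find_author_block_bounds (latex_code : String) (out : Option Int × Option Int) : Prop := out = find_author_block_bounds_alt latex_code
instance (latex_code : String) (out : Option Int × Option Int) : Decidable (Spec_find_author_block_bounds latex_code out) := by unfold Spec_find_author_block_bounds; infer_instance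

-- ===== CLAIM (what is proved, stated in full; the proofs are below) =====
def Claim_equal_find_author_block_bounds : Prop := ∀ (latex_code : String), Dom_find_author_block_bounds latex_code → Spec_find_author_block_bounds latex_code (find_author_block_bounds latex_code)

-- ===== LEMMAS AND PROOFS =====

theorem singleton_infix_iff_mem {α : Type} (a : α) (l : List α) : [a] <:+: l ↔ a ∈ l := by
  constructor
  · rintro ⟨s, t, rfl⟩; simp
  · intro h
    obtain ⟨s, t, rfl⟩ := List.append_of_mem h
    exact ⟨s, t, by simp⟩

theorem singleton_prefix_iff {α : Type} (a : α) (l : List α) : [a] <+: l ↔ l.head? = some a := by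
  constructor
  · rintro ⟨t, rfl⟩; rfl
  · intro h
    cases l with
    | nil => simp at h
    | cons x xs =>
      simp only [List.head?_cons, Option.some.injEq] at h
      exact ⟨xs, by simp [h]⟩

-- single-char find: hit characterisation
theorem findChar_hit (l : List Char) (ch : Char) (h : PySem.Chars.find l [ch] ≠ -1) :
    0 ≤ PySem.Chars.find l [ch] ∧ (PySem.Chars.find l [ch]).toNat < l.length ∧
    l[(PySem.Chars.find l [ch]).toNat]? = some ch ∧
    ∀ i < (PySem.Chars.find l [ch]).toNat, l[i]? ≠ some ch := by
  have h0 : 0 ≤ PySem.Chars.find l [ch] := by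
    have := PySem.Chars.neg_one_le_find l [ch]; omega
  obtain ⟨hp, hmin⟩ := PySem.Chars.find_spec h0
  rw [singleton_prefix_iff, List.head?_drop] at hp
  refine ⟨h0, ?_, hp, ?_⟩
  · by_contra hge
    push Not at hge
    rw [List.getElem?_eq_none hge] at hp; simp at hp
  · intro i hi
    have := hmin i hi
    rw [singleton_prefix_iff, List.head?_drop] at this
    exact this

theorem findChar_miss (l : List Char) (ch : Char) (h : PySem.Chars.find l [ch] = -1) :
    ch ∉ l := by
  rw [PySem.Chars.find_eq_neg_one_iff, singleton_infix_iff_mem] at h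
  exact h

-- A's loop returns (none,none) once i is past the end
theorem aLoop_end (cs : List Char) (st count i : Int) (h : (cs.length : Int) ≤ i) :
    pvALoop cs st count i = (none, none) := by
  rw [pvALoop]; simp [not_lt.mpr h]

-- A's loop ignores a non-brace character
theorem aLoop_skip_one (cs : List Char) (st count : Int) (i : Nat) (hi : i < cs.length)
    (h1 : cs[i]? ≠ some '{') (h2 : cs[i]? ≠ some '}') :
    pvALoop cs st count (i : Int) = pvALoop cs st count ((i : Int) + 1) := by
  rw [pvALoop]
  have hlt : (i : Int) < (cs.length : Int) := by exact_mod_cast hi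
  have hg : PySem.List.pyGetD cs (i : Int) ' ' = cs[i] := by
    simp [PySem.List.pyGetD_natCast, List.getD_eq_getElem?_getD, List.getElem?_eq_getElem hi]
  have h1' : cs[i] ≠ '{' := fun he => h1 (by rw [List.getElem?_eq_getElem hi, he])
  have h2' : cs[i] ≠ '}' := fun he => h2 (by rw [List.getElem?_eq_getElem hi, he])
  simp [hlt, hg, h1', h2']

-- A's loop skips a whole stretch of non-brace characters
theorem aLoop_skip (cs : List Char) (st count : Int) (i j : Nat) (hij : i ≤ j)
    (hj : j ≤ cs.length)
    (h : ∀ k, i ≤ k → k < j → cs[k]? ≠ some '{' ∧ cs[k]? ≠ some '}') :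
    pvALoop cs st count (i : Int) = pvALoop cs st count (j : Int) := by
  induction j, hij using Nat.le_induction with
  | base => rfl
  | succ n hn ih =>
    have hnl : n < cs.length := by omega
    have hk := h n hn (by omega)
    rw [ih (by omega) (fun k hk1 hk2 => h k hk1 (by omega)),
        aLoop_skip_one cs st count n hnl hk.1 hk.2]
    norm_cast

-- with no '}' left, A's loop runs off the end
theorem aLoop_noclose (cs : List Char) (st : Int) :
    ∀ n pos, ∀ count : Int, cs.length - pos ≤ n → '}' ∉ cs.drop pos →
      pvALoop cs st count (pos : Int) = (none, none) := by
  intro n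
  induction n with
  | zero =>
    intro pos count hle _
    exact aLoop_end cs st count pos (by exact_mod_cast Nat.le_of_sub_eq_zero (by omega))
  | succ n ih =>
    intro pos count hle hmem
    by_cases hpos : pos < cs.length
    · have hget : cs[pos]? = some cs[pos] := List.getElem?_eq_getElem hpos
      have hmem1 : cs[pos] ∈ cs.drop pos := by
        have : (cs.drop pos).head? = some cs[pos] := by rw [List.head?_drop]; exact hget
        exact List.mem_of_mem_head? (by rw [this]; simp)
      have hne : cs[pos] ≠ '}' := fun he => hmem (he ▸ hmem1)
      have hmem' : '}' ∉ cs.drop (pos + 1) := by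
        intro hx
        exact hmem (List.drop_subset 1 (cs.drop pos) (by rw [List.drop_drop]; exact hx))
      have hrec : ∀ c : Int, pvALoop cs st c ((pos : Int) + 1) = (none, none) := by
        intro c
        have := ih (pos + 1) c (by omega) hmem'
        rw [show ((pos : Int) + 1) = ((pos + 1 : Nat) : Int) by push_cast; ring]
        exact this
      rw [pvALoop]
      have hlt : (pos : Int) < (cs.length : Int) := by exact_mod_cast hpos
      have hg : PySem.List.pyGetD cs (pos : Int) ' ' = cs[pos] := by
        simp [PySem.List.pyGetD_natCast, List.getD_eq_getElem?_getD, List.getElem?_eq_getElem hpos]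
      by_cases hb : cs[pos] = '{'
      · simp [hlt, hg, hb, hrec]
      · simp [hlt, hg, hb, hne, hrec]
    · exact aLoop_end cs st count pos (by exact_mod_cast (by omega : cs.length ≤ pos))

theorem aLoop_step_open (cs : List Char) (st count : Int) (j : Nat) (hj : j < cs.length)
    (h : cs[j]? = some '{') :
    pvALoop cs st count (j : Int) = pvALoop cs st (count + 1) ((j : Int) + 1) := by
  rw [pvALoop]
  have hlt : (j : Int) < (cs.length : Int) := by exact_mod_cast hj
  have hg : PySem.List.pyGetD cs (j : Int) ' ' = '{' := by
    rw [List.getElem?_eq_getElem hj] at h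
    simp only [Option.some.injEq] at h
    simp [PySem.List.pyGetD_natCast, List.getD_eq_getElem?_getD, List.getElem?_eq_getElem hj, h]
  simp [hlt, hg]

theorem aLoop_step_close (cs : List Char) (st count : Int) (j : Nat) (hj : j < cs.length)
    (h : cs[j]? = some '}') :
    pvALoop cs st count (j : Int) =
      if count - 1 = 0 then (some st, some ((j : Int) + 1))
      else pvALoop cs st (count - 1) ((j : Int) + 1) := by
  rw [pvALoop]
  have hlt : (j : Int) < (cs.length : Int) := by exact_mod_cast hj
  have hg : PySem.List.pyGetD cs (j : Int) ' ' = '}' := by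
    rw [List.getElem?_eq_getElem hj] at h
    simp only [Option.some.injEq] at h
    simp [PySem.List.pyGetD_natCast, List.getD_eq_getElem?_getD, List.getElem?_eq_getElem hj, h]
  simp [hlt, hg]

-- the heart: B's brace-jumping loop equals A's character walk
theorem bridge (cs : List Char) (st : Int) :
    ∀ fuel pos, ∀ count : Int, pos ≤ cs.length → cs.length + 1 - pos ≤ fuel →
      pvBLoop fuel cs st count pos = pvALoop cs st count (pos : Int) := by
  intro fuel
  induction fuel with
  | zero => intro pos count h1 h2; omega
  | succ fuel ih =>
    intro pos count hpos hfuel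
    simp only [pvBLoop]
    rw [PySem.Chars.findFrom_natCast cs ['}'] pos hpos,
        PySem.Chars.findFrom_natCast cs ['{'] pos hpos]
    by_cases hc : PySem.Chars.find (cs.drop pos) ['}'] = -1
    · have hnone : '}' ∉ cs.drop pos := findChar_miss _ '}' hc
      rw [aLoop_noclose cs st cs.length pos count (by omega) hnone]
      simp [hc]
    · obtain ⟨hc0, hclen, hcget, hcmin⟩ := findChar_hit (cs.drop pos) '}' hc
      have hdlen : (cs.drop pos).length = cs.length - pos := by simp
      set nc := PySem.Chars.find (cs.drop pos) ['}'] with hnc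
      have hncne : ¬ ((pos : Int) + nc = -1) := by omega
      simp only [if_neg hc, if_neg hncne]
      have hcget' : cs[pos + nc.toNat]? = some '}' := by
        rw [← List.getElem?_drop]; exact hcget
      have hmlt : pos + nc.toNat < cs.length := by omega
      have closeCase : (∀ i < nc.toNat, (cs.drop pos)[i]? ≠ some '{') →
          (if count - 1 = 0 then ((some st, some ((pos : Int) + nc + 1)) : Option Int × Option Int)
           else pvBLoop fuel cs st (count - 1) ((pos : Int) + nc + 1).toNat) =
          pvALoop cs st count (pos : Int) := by
        intro hmino
        have hskip : pvALoop cs st count (pos : Int) =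
            pvALoop cs st count ((pos + nc.toNat : Nat) : Int) := by
          apply aLoop_skip cs st count pos (pos + nc.toNat) (by omega) (by omega)
          intro k hk1 hk2
          have hk3 : k - pos < nc.toNat := by omega
          have e : cs[k]? = (cs.drop pos)[k - pos]? := by
            rw [List.getElem?_drop]; congr 1; omega
          exact ⟨by rw [e]; exact hmino _ hk3, by rw [e]; exact hcmin _ hk3⟩
        rw [hskip, aLoop_step_close cs st count (pos + nc.toNat) hmlt hcget']
        have hcast : ((pos + nc.toNat : Nat) : Int) + 1 = (pos : Int) + nc + 1 := by omega
        have ht : ((pos : Int) + nc + 1).toNat = pos + nc.toNat + 1 := by omega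
        by_cases hz : count - 1 = 0
        · rw [if_pos hz, if_pos hz, ← hcast]
        · rw [if_neg hz, if_neg hz, ht,
              ih (pos + nc.toNat + 1) (count - 1) (by omega) (by omega)]
          congr 1
      by_cases ho : PySem.Chars.find (cs.drop pos) ['{'] = -1
      · have hmino : ∀ i < nc.toNat, (cs.drop pos)[i]? ≠ some '{' := by
          intro i _ hx
          exact findChar_miss _ '{' ho (List.mem_of_getElem? hx)
        rw [if_pos ho, if_neg (by push Not; intro h; omega :
            ¬ ((-1 : Int) ≠ -1 ∧ (-1 : Int) < (pos : Int) + nc))]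
        exact closeCase hmino
      · obtain ⟨ho0, holen, hoget, homin⟩ := findChar_hit (cs.drop pos) '{' ho
        set no := PySem.Chars.find (cs.drop pos) ['{'] with hno
        have hone : ((pos : Int) + no ≠ -1) := by omega
        rw [if_neg ho]
        by_cases hlt : (pos : Int) + no < (pos : Int) + nc
        · rw [if_pos ⟨hone, hlt⟩]
          have hoget' : cs[pos + no.toNat]? = some '{' := by
            rw [← List.getElem?_drop]; exact hoget
          have hskip : pvALoop cs st count (pos : Int) =
              pvALoop cs st count ((pos + no.toNat : Nat) : Int) := by
            apply aLoop_skip cs st count pos (pos + no.toNat) (by omega) (by omega)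
            intro k hk1 hk2
            have hk3 : k - pos < no.toNat := by omega
            have e : cs[k]? = (cs.drop pos)[k - pos]? := by
              rw [List.getElem?_drop]; congr 1; omega
            exact ⟨by rw [e]; exact homin _ hk3, by rw [e]; exact hcmin _ (by omega)⟩
          have holt : pos + no.toNat < cs.length := by omega
          have ht : ((pos : Int) + no + 1).toNat = pos + no.toNat + 1 := by omega
          rw [hskip, aLoop_step_open cs st count (pos + no.toNat) holt hoget', ht,
              ih (pos + no.toNat + 1) (count + 1) (by omega) (by omega)]
          congr 1
        · rw [if_neg (by push Not; intro _; omega :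
              ¬ ((pos : Int) + no ≠ -1 ∧ (pos : Int) + no < (pos : Int) + nc))]
          exact closeCase (fun i hi => homin i (by omega))

theorem pvAB_eq : ∀ (latex_code : String),
    find_author_block_bounds latex_code = find_author_block_bounds_alt latex_code := by
  intro latex
  simp only [find_author_block_bounds, find_author_block_bounds_alt]
  by_cases h : PySem.Str.find latex "\\author{" = -1
  · rw [if_pos h, if_pos h]
  · rw [if_neg h, if_neg h]
    set cs := latex.toList with hcs
    rw [PySem.Str.find_eq] at h ⊢
    set as := PySem.Chars.find cs "\\author{".toList with has
    have h0 : 0 ≤ as := by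
      have := PySem.Chars.neg_one_le_find cs "\\author{".toList; omega
    obtain ⟨hp, -⟩ := PySem.Chars.find_spec h0
    have hlen8 : ("\\author{".toList).length = 8 := by decide
    have hle : as.toNat + 8 ≤ cs.length := by
      have := hp.length_le
      rw [hlen8, List.length_drop] at this
      omega
    have hpos : (as + 8 - 1).toNat ≤ cs.length := by omega
    rw [bridge cs as (cs.length + 1) ((as + 8 - 1).toNat) 0 hpos (by omega)]
    congr 1
    omega

-- ===== VERDICT (by name: the statement is the Claim_ definition above) =====
theorem find_author_block_bounds_spec : Claim_equal_find_author_block_bounds := by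
  intro latex_code _
  unfold Spec_find_author_block_bounds
  exact pvAB_eq latex_code
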